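-- pv_equiv track=rewrite | github.com/deluge-torrent/deluge | deluge/ui/gtkui/edittrackersdialog.py | last_tier_trackers_from_liststore
-- ===== SOURCE A (Python) =====
-- def last_tier_trackers_from_liststore(trackers_liststore):
--     """Create a list of tracker from existing liststore and find last tier number.
--
--     Args:
--         tracker_liststore (gtk.ListStore): A gtk.ListStore with [tier (int), tracker (str)] rows.
--
--     Returns:
--         tuple(int, list): A tuple containing last tier number and list of trackers.
--
--     """
--
--     last_tier = 0
--     trackers_from_liststore = []
--     for tier, tracker in trackers_liststore:
--         trackers_from_liststore.append(tracker)
--         if tier >= last_tier: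
--             last_tier = tier + 1
--
--     return last_tier, trackers_from_liststore
-- ===== SOURCE B (Python) =====
-- def last_tier_trackers_from_liststore(trackers_liststore):
--     if not trackers_liststore:
--         return 0, []
--     tiers, trackers = zip(*trackers_liststore)
--     top = sorted(tiers)[-1]
--     return (top + 1 if top >= 0 else 0), list(trackers)
-- ===== Notes on version B (the rewrite author's own statement) =====
-- stated objective: alternative
-- what changed: Instead of a single loop with a conditional running-max accumulator, B transposes the rows with zip, sorts the tier column and takes its last element as the top tier (clamping negatives to 0), returning early on the empty list.
import Mathlib
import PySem

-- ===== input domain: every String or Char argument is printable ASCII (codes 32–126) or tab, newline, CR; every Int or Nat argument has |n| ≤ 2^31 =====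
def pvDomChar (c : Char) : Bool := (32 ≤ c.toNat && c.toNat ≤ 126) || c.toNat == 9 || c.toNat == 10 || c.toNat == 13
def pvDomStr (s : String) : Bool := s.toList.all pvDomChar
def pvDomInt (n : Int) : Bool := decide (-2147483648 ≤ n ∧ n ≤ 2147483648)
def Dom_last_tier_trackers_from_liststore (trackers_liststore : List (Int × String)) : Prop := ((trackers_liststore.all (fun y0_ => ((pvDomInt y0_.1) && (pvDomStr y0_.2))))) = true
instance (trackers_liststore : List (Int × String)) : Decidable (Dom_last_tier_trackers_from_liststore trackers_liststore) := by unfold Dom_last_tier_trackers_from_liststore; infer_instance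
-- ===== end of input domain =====

-- ===== PORT A =====
-- B is an alternative: it transposes the rows and finds the top tier by sorting the tier column and taking its last element.
def last_tier_trackers_from_liststore (trackers_liststore : List (Int × String)) : Int × List String :=
  let s := trackers_liststore.foldl
    (fun (st : Int × List String) tt =>
      let trackers := st.2 ++ [tt.2]
      let last := if tt.1 ≥ st.1 then tt.1 + 1 else st.1
      (last, trackers)) (0, [])
  (s.1, s.2)

-- ===== PORT B =====
def last_tier_trackers_from_liststore_alt (trackers_liststore : List (Int × String)) : Int × List String :=
  if trackers_liststore.isEmpty then (0, [])
  else
    let tiers := trackers_liststore.map Prod.fst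
    let trackers := trackers_liststore.map Prod.snd
    -- sorted(tiers)[-1]; the none branch is unreachable (the list is nonempty here)
    match PySem.List.pyGet? (PySem.List.sorted tiers (fun x => x) false) (-1) with
    | some top => ((if top ≥ 0 then top + 1 else 0), trackers)
    | none => (0, trackers)

-- ===== PRECONDITION & SPEC =====
def Spec_last_tier_trackers_from_liststore (trackers_liststore : List (Int × String)) (out : Int × List String) : Prop := out = last_tier_trackers_from_liststore_alt trackers_liststore
instance (trackers_liststore : List (Int × String)) (out : Int × List String) : Decidable (Spec_last_tier_trackers_from_liststore trackers_liststore out) := by unfold Spec_last_tier_trackers_from_liststore; infer_instance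

-- ===== CLAIM (what is proved, stated in full; the proofs are below) =====
def Claim_equal_last_tier_trackers_from_liststore : Prop := ∀ (trackers_liststore : List (Int × String)), Dom_last_tier_trackers_from_liststore trackers_liststore → Spec_last_tier_trackers_from_liststore trackers_liststore (last_tier_trackers_from_liststore trackers_liststore)

-- ===== LEMMAS AND PROOFS =====

-- A's loop computes the running max of tier+1 (seeded 0) and the tracker column.
theorem ltt_fold (l : List (Int × String)) (a : Int) (acc : List String) :
    l.foldl (fun (st : Int × List String) tt =>
      (if tt.1 ≥ st.1 then tt.1 + 1 else st.1, st.2 ++ [tt.2])) (a, acc)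
    = ((l.map (fun tt => tt.1 + 1)).foldl max a, acc ++ l.map (fun tt => tt.2)) := by
  induction l generalizing a acc with
  | nil => simp
  | cons hd tl ih =>
      simp only [List.foldl_cons, List.map_cons, ih]
      have h1 : (if hd.1 ≥ a then hd.1 + 1 else a) = max a (hd.1 + 1) := by
        rcases le_or_gt a hd.1 with h | h
        · rw [if_pos h, max_eq_right (by omega)]
        · rw [if_neg (by omega), max_eq_left (by omega)]
      rw [h1]; simp

-- sorted(xs)[-1] on a nonempty list is a member that bounds every element.
theorem sorted_last_max (tiers : List Int) (h : tiers ≠ []) :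
    ∃ m, PySem.List.pyGet? (PySem.List.sorted tiers (fun x => x) false) (-1) = some m ∧
      m ∈ tiers ∧ ∀ y ∈ tiers, y ≤ m := by
  set s := PySem.List.sorted tiers (fun x => x) false with hs
  have hperm : s.Perm tiers := PySem.List.sorted_perm ..
  have hne : s ≠ [] := by
    simpa [hs, PySem.List.sorted_eq_nil_iff] using h
  have hlen : 0 < s.length := List.length_pos_iff.mpr hne
  refine ⟨s.getLast hne, ?_, ?_, ?_⟩
  · simp only [PySem.List.pyGet?, PySem.List.pyIdx?]
    rw [List.getLast_eq_getElem]
    rw [if_pos (by omega : -(s.length : Int) ≤ -1)]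
    have h1 : ((- -1 : Int)).toNat = 1 := by norm_num
    rw [h1]
    show s[s.length - 1]? = some s[s.length - 1]
    exact List.getElem?_eq_getElem (by omega)
  · exact hperm.mem_iff.mp (List.getLast_mem hne)
  · intro y hy
    have hy' : y ∈ s := hperm.mem_iff.mpr hy
    obtain ⟨i, hi, hig⟩ := List.getElem_of_mem hy'
    rw [List.getLast_eq_getElem]
    have := PySem.List.sorted_id_getElem_mono (xs := tiers) (p := i) (q := s.length - 1)
      (by omega) (by simpa [← hs] using (by omega : s.length - 1 < s.length))
    simpa [← hs, hig] using this

theorem last_tier_trackers_from_liststore_spec : Claim_equal_last_tier_trackers_from_liststore := by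
  intro l _
  show last_tier_trackers_from_liststore l = last_tier_trackers_from_liststore_alt l
  cases l with
  | nil => rfl
  | cons hd tl =>
    simp only [last_tier_trackers_from_liststore, last_tier_trackers_from_liststore_alt, ltt_fold]
    obtain ⟨m, hget, hmem, hmax⟩ := sorted_last_max ((hd :: tl).map Prod.fst) (by simp)
    simp only [List.isEmpty_cons, hget, List.nil_append]
    have hF := PySem.List.le_foldl_max_int ((hd :: tl).map (fun tt => tt.1 + 1)) (fun x => x) 0
    -- identify the projection fold with the plain max fold
    have hplain : ((hd :: tl).map (fun tt => tt.1 + 1)).foldl (fun acc y => max acc ((fun x => x) y)) 0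
        = ((hd :: tl).map (fun tt => tt.1 + 1)).foldl max 0 := rfl
    set F := ((hd :: tl).map (fun tt => tt.1 + 1)).foldl max 0 with hFdef
    have h0F : (0 : Int) ≤ F := by rw [← hplain]; exact hF.1
    have hub : ∀ x ∈ (hd :: tl).map (fun tt => tt.1 + 1), x ≤ F := by
      intro x hx; rw [← hplain]; exact hF.2 x hx
    have hmem' : m + 1 ∈ (hd :: tl).map (fun tt => tt.1 + 1) := by
      obtain ⟨p, hp, hpe⟩ := List.mem_map.mp hmem
      exact List.mem_map.mpr ⟨p, hp, by simp [hpe]⟩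
    have hle : m + 1 ≤ F := hub _ hmem'
    have hFm : F ≤ max 0 (m + 1) := by
      rcases PySem.List.foldl_max_mem ((hd :: tl).map (fun tt => tt.1 + 1)) 0 with h | h
      · omega
      · obtain ⟨p, hp, hpe⟩ := List.mem_map.mp h
        have : p.1 ≤ m := hmax _ (List.mem_map.mpr ⟨p, hp, rfl⟩)
        omega
    have hFe : F = max 0 (m + 1) := by omega
    rw [hFe]
    refine Prod.ext ?_ rfl
    show max 0 (m + 1) = if m ≥ 0 then m + 1 else 0
    split_ifs with h' <;> omega
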